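-- pv_equiv track=rewrite | github.com/originalnicodr/LCC-CarpetaDigital | Segundo año/Complementos de Matemática I/practica3.py | check_is_hamiltonian_circuit
-- ===== SOURCE A (Python) =====
-- def check_is_hamiltonian_circuit(graph, path):
--     """Comprueba si una lista de aristas constituye un ciclo hamiltoniano
--     en un grafo.
--
--     Args:
--         graph (grafo): Grafo en formato de listas.
--                        Ej: (['a', 'b', 'c'], [('a', 'b'), ('b', 'c')])
--
--         path (lista de aristas): posible ciclo
--                                  Ej: [('a', 'b), ('b', 'c')]
--
--     Returns:
--         boolean: path es ciclo hamiltoniano en graph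
--
--     Raises:
--         TypeError: Cuando el tipo de un argumento es inválido
--     """
--     vertices,edges=graph
--     lastVertix= None
--     visitedVertices= set()
--     visitedEdges= set()
--
--     if path==[]:
--         if graph==([],[]):
--             return True
--         else: return False
--     #no es necesario este else
--     if(path[0][0]!=path[-1][1]): return False
--
--     for edge in path:
--         if edge not in edges or edge in visitedEdges:   return False
--         if lastVertix!=None and lastVertix!=edge[0]: return False
--         if lastVertix==None:  visitedVertices.add(edge[0])
--
--         if path[-1]!=edge:
--             if edge[1] in visitedVertices: return False
--         lastVertix=edge[1]
--         visitedVertices.add(edge[1])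
--         visitedEdges.add(edge)
--
--     return visitedVertices==set(vertices)
-- ===== SOURCE B (Python) =====
-- def check_is_hamiltonian_circuit(graph, path):
--     vertices, edges = graph
--     if path == []:
--         return graph == ([], [])
--     V = [path[0][0]] + [e[1] for e in path]
--     return (V[0] == V[-1]
--             and all(e in edges for e in path)
--             and len(set(path)) == len(path)
--             and all(path[i][0] == V[i] for i in range(len(path)))
--             and len(set(V[:-1])) == len(V) - 1
--             and set(V) == set(vertices))
-- ===== Notes on version B (the rewrite author's own statement) =====
-- stated objective: simpler
-- what changed: A's single early-return loop carrying lastVertix/visitedVertices/visitedEdges state is replaced by building the vertex sequence V once and combining independent whole-list validation passes (closure, edge membership, edge distinctness, chaining, interior-vertex distinctness, vertex-set equality).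
import Mathlib
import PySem

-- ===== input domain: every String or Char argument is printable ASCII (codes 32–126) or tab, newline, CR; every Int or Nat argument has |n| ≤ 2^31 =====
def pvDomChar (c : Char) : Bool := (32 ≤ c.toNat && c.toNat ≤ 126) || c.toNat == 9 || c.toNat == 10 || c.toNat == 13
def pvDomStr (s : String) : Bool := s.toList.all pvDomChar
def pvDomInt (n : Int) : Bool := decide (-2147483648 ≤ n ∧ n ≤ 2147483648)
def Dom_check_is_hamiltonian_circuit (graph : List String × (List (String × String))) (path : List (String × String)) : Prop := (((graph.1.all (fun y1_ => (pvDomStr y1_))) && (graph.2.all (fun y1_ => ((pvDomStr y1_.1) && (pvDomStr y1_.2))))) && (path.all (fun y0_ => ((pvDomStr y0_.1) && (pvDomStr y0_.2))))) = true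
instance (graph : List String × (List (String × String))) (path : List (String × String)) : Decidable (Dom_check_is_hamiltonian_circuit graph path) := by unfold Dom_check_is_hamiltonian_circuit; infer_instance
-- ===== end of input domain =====

-- B replaces A's single stateful early-return loop by one vertex-sequence construction plus
-- independent whole-list validation passes (objective: simpler decomposition; same cost, proved equal).

-- ===== PORT A =====
-- the for-loop of A, carrying lastVertix / visitedVertices / visitedEdges
def pvALoop (edges : List (String × String)) (lastEdge : String × String)
    (vertices : List String) :
    List (String × String) → Option String → PySem.Set String → PySem.Set (String × String) → Bool
  | [], _, vV, _ => PySem.Set.equal vV (PySem.Set.ofList vertices)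
  | e :: rest, lastV, vV, vE =>
    if !(edges.contains e) || PySem.Set.contains vE e then false
    else if (match lastV with | some v => v != e.1 | none => false) then false
    else
      let vV1 := match lastV with | none => PySem.Set.add vV e.1 | some _ => vV
      if lastEdge != e && PySem.Set.contains vV1 e.2 then false
      else pvALoop edges lastEdge vertices rest (some e.2) (PySem.Set.add vV1 e.2) (PySem.Set.add vE e)

def check_is_hamiltonian_circuit (graph : List String × (List (String × String))) (path : List (String × String)) : Bool :=
  match path with
  | [] => decide (graph = ([], []))
  | e0 :: rest =>
    if e0.1 != (List.getLastD rest e0).2 then false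
    else pvALoop graph.2 (List.getLastD rest e0) graph.1 (e0 :: rest) none PySem.Set.empty PySem.Set.empty

-- ===== PORT B =====
def check_is_hamiltonian_circuit_alt (graph : List String × (List (String × String))) (path : List (String × String)) : Bool :=
  match path with
  | [] => decide (graph = ([], []))
  | e0 :: rest =>
    let p := e0 :: rest
    let V := e0.1 :: p.map (fun e => e.2)
    (V.headI == V.getLastD "")
    && p.all (fun e => graph.2.contains e)
    && ((PySem.Set.ofList p).length == p.length)
    && (List.range p.length).all (fun i => (p.getD i ("", "")).1 == V.getD i "")
    && ((PySem.Set.ofList V.dropLast).length == V.length - 1)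
    && PySem.Set.equal (PySem.Set.ofList V) (PySem.Set.ofList graph.1)

-- ===== PRECONDITION & SPEC =====
def Spec_check_is_hamiltonian_circuit (graph : List String × (List (String × String))) (path : List (String × String)) (out : Bool) : Prop := out = check_is_hamiltonian_circuit_alt graph path
instance (graph : List String × (List (String × String))) (path : List (String × String)) (out : Bool) : Decidable (Spec_check_is_hamiltonian_circuit graph path out) := by unfold Spec_check_is_hamiltonian_circuit; infer_instance

-- ===== CLAIM (what is proved, stated in full; the proofs are below) =====
def Claim_equal_check_is_hamiltonian_circuit : Prop := ∀ (graph : List String × (List (String × String))) (path : List (String × String)), Dom_check_is_hamiltonian_circuit graph path → Spec_check_is_hamiltonian_circuit graph path (check_is_hamiltonian_circuit graph path)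

-- ===== LEMMAS AND PROOFS =====

def pvChain : String → List (String × String) → Prop
  | _, [] => True
  | v, e :: r => e.1 = v ∧ pvChain e.2 r

def pvGood (edges : List (String × String)) (vertices : List String)
    (rest : List (String × String)) (v : String)
    (vV : PySem.Set String) (vE : PySem.Set (String × String)) : Prop :=
  (∀ e ∈ rest, e ∈ edges) ∧ (∀ e ∈ rest, e ∉ vE) ∧ rest.Nodup ∧ pvChain v rest ∧
  (rest.map (fun e => e.2)).dropLast.Nodup ∧
  (∀ x ∈ (rest.map (fun e => e.2)).dropLast, x ∉ vV) ∧
  PySem.Set.equal (List.foldl PySem.Set.add vV (rest.map (fun e => e.2)))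
      (PySem.Set.ofList vertices) = true

theorem pvALoop_dead (edges : List (String × String)) (lastEdge : String × String)
    (vertices : List String) :
    ∀ (rest : List (String × String)) (lv : Option String)
      (vV : PySem.Set String) (vE : PySem.Set (String × String)),
      rest.getLast? = some lastEdge → lastEdge ∈ vE →
      pvALoop edges lastEdge vertices rest lv vV vE = false := by
  intro rest
  induction rest with
  | nil => intro lv vV vE h; simp at h
  | cons e rest' ih =>
    intro lv vV vE h hmem
    by_cases hr : rest' = []
    · subst hr
      simp at h
      subst h
      simp [pvALoop, hmem]
    · have h' : rest'.getLast? = some lastEdge := by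
        rw [List.getLast?_cons] at h
        cases hx : rest'.getLast? with
        | none => exact absurd (List.getLast?_eq_none_iff.mp hx) hr
        | some w => rw [hx] at h; simp at h; exact congrArg some h
      simp only [pvALoop]
      split_ifs with h1 h2 h3
      · rfl
      · rfl
      · rfl
      · exact ih _ _ _ h' ((PySem.Set.mem_add _ _ _).mpr (Or.inl hmem))

theorem pvLenOfList {α : Type} [BEq α] [LawfulBEq α] [DecidableEq α] (xs : List α) :
    (PySem.Set.ofList xs).length = xs.length ↔ xs.Nodup := by
  have hperm : (PySem.Set.ofList xs).Perm xs.dedup := by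
    refine (List.perm_ext_iff_of_nodup (PySem.Set.nodup_ofList xs) (List.nodup_dedup xs)).mpr ?_
    intro a
    rw [PySem.Set.mem_ofList, List.mem_dedup]
  rw [hperm.length_eq]
  constructor
  · intro h
    have := (List.dedup_sublist xs).eq_of_length h
    rw [← this]
    exact List.nodup_dedup xs
  · intro h
    rw [List.dedup_eq_self.mpr h]

theorem pvChainIdx (d : String × String) : ∀ (l : List (String × String)) (v : String),
    (((List.range l.length).all
      (fun i => (l.getD i d).1 == (v :: l.map (fun e => e.2)).getD i "")) = true) ↔
    pvChain v l := by
  intro l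
  induction l with
  | nil => intro v; simp [pvChain]
  | cons e r ih =>
    intro v
    rw [List.length_cons, List.range_succ_eq_map]
    simp only [List.all_cons, List.all_map, Bool.and_eq_true]
    constructor
    · rintro ⟨h0, hr⟩
      refine ⟨by simpa using h0, (ih e.2).mp ?_⟩
      simpa using hr
    · rintro ⟨h0, hc⟩
      refine ⟨by simpa using h0, ?_⟩
      have := (ih e.2).mpr hc
      simpa using this

theorem pvALoop_char (edges : List (String × String)) (lastEdge : String × String)
    (vertices : List String) :
    ∀ (rest : List (String × String)) (v : String)
      (vV : PySem.Set String) (vE : PySem.Set (String × String)),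
      (rest ≠ [] → rest.getLast? = some lastEdge) → lastEdge ∉ vE →
      (pvALoop edges lastEdge vertices rest (some v) vV vE = true ↔
        pvGood edges vertices rest v vV vE) := by
  intro rest
  induction rest with
  | nil =>
    intro v vV vE _ _
    simp [pvALoop, pvGood, pvChain]
  | cons e rest' ih =>
    intro v vV vE hlast hvE
    have hL : rest'.getLastD e = lastEdge := by
      have h := hlast (by simp)
      rw [List.getLast?_cons, Option.some.injEq] at h
      rwa [List.getLastD_eq_getLast?]
    simp only [pvALoop]
    by_cases hce : e ∈ edges
    swap
    · rw [if_pos (by simp [List.contains_eq_mem, hce])]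
      simp only [Bool.false_eq_true, false_iff, pvGood]
      rintro ⟨h1, -⟩
      exact hce (h1 e List.mem_cons_self)
    by_cases hme : e ∈ vE
    · rw [if_pos (by simp [List.contains_eq_mem, hme])]
      simp only [Bool.false_eq_true, false_iff, pvGood]
      rintro ⟨-, h2, -⟩
      exact h2 e List.mem_cons_self hme
    rw [if_neg (by simp [List.contains_eq_mem, hce, hme])]
    by_cases hv : e.1 = v
    swap
    · rw [if_pos (by simp; exact fun h => hv h.symm)]
      simp only [Bool.false_eq_true, false_iff, pvGood, pvChain]
      rintro ⟨-, -, -, ⟨h4, -⟩, -⟩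
      exact hv h4
    rw [if_neg (by simp [hv])]
    by_cases heq : e = lastEdge
    · rw [if_neg (by simp [heq])]
      by_cases hr : rest' = []
      · subst hr
        have he2 : e = lastEdge := heq
        simp only [pvALoop]
        simp [pvGood, pvChain, hce, hme, hv]
      · have hgl : rest'.getLast? = some lastEdge := by
          cases hx : rest'.getLast? with
          | none => exact absurd (List.getLast?_eq_none_iff.mp hx) hr
          | some w =>
            rw [List.getLastD_eq_getLast?, hx] at hL
            simp at hL
            exact congrArg some hL
        have hmem' : e ∈ rest' := by
          obtain ⟨ys, hys⟩ := List.getLast?_eq_some_iff.mp hgl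
          rw [heq, hys]; simp
        rw [pvALoop_dead edges lastEdge vertices rest' _ _ _ hgl
          ((PySem.Set.mem_add _ _ _).mpr (Or.inr heq.symm))]
        simp only [Bool.false_eq_true, false_iff, pvGood]
        rintro ⟨-, -, h3, -⟩
        exact (List.nodup_cons.mp h3).1 hmem'
    · have hr : rest' ≠ [] := by
        intro h
        rw [h] at hL
        exact heq hL
      have hgl : rest'.getLast? = some lastEdge := by
        cases hx : rest'.getLast? with
        | none => exact absurd (List.getLast?_eq_none_iff.mp hx) hr
        | some w =>
          rw [List.getLastD_eq_getLast?, hx] at hL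
          simp at hL
          exact congrArg some hL
      have hne : lastEdge ≠ e := fun h => heq h.symm
      have hmapne : (rest'.map (fun e => e.2)) ≠ [] := by simpa using hr
      by_cases hv2 : e.2 ∈ vV
      · rw [if_pos (by simp [List.contains_eq_mem, hv2, hne])]
        simp only [Bool.false_eq_true, false_iff, pvGood]
        rintro ⟨-, -, -, -, -, h6, -⟩
        refine h6 e.2 ?_ hv2
        rw [List.map_cons, List.dropLast_cons_of_ne_nil hmapne]
        exact List.mem_cons_self
      · rw [if_neg (by simp [List.contains_eq_mem, hv2])]
        rw [ih e.2 (vV.add e.2) (vE.add e) (fun _ => hgl)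
          (by rw [PySem.Set.mem_add]; exact fun h => h.elim hvE hne)]
        simp only [pvGood, pvChain, List.mem_cons, List.nodup_cons, List.map_cons,
          List.dropLast_cons_of_ne_nil hmapne, PySem.Set.mem_add, List.foldl_cons,
          forall_eq_or_imp, not_or, hce, hme, hv]
        constructor
        · rintro ⟨h1, h2, h3, h4, h5, h6, h7⟩
          exact ⟨⟨trivial, h1⟩, ⟨not_false, fun a ha => (h2 a ha).1⟩,
            ⟨fun hmem => (h2 e hmem).2 rfl, h3⟩, ⟨trivial, h4⟩,
            ⟨fun hmem => (h6 _ hmem).2 rfl, h5⟩,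
            ⟨hv2, fun a ha => (h6 a ha).1⟩, h7⟩
        · rintro ⟨⟨-, h1⟩, ⟨-, h2⟩, ⟨h3a, h3⟩, ⟨-, h4⟩, ⟨h5a, h5⟩, ⟨-, h6⟩, h7⟩
          exact ⟨h1, fun a ha => ⟨h2 a ha, fun hae => h3a (hae ▸ ha)⟩, h3, h4, h5,
            fun x hx => ⟨h6 x hx, fun hxe => h5a (hxe ▸ hx)⟩, h7⟩

theorem pvGetLastD_map (f : (String × String) → String) :
    ∀ (l : List (String × String)) (a : String × String),
      (l.map f).getLastD (f a) = f (l.getLastD a) := by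
  intro l
  induction l with
  | nil => intro a; rfl
  | cons b l ih => intro a; rw [List.map_cons, List.getLastD_cons, List.getLastD_cons, ih]

theorem pvMemFoldlAdd (l : List String) (s : PySem.Set String) (y : String) :
    y ∈ List.foldl PySem.Set.add s l ↔ y ∈ s ∨ y ∈ l := by
  have := PySem.Set.mem_foldl_add l (fun x => x) s y
  simpa using this

set_option maxHeartbeats 2000000 in
theorem pvMain : ∀ (graph : List String × (List (String × String))) (path : List (String × String)),
    check_is_hamiltonian_circuit graph path = check_is_hamiltonian_circuit_alt graph path := by
  intro graph path
  cases path with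
  | nil => rfl
  | cons e0 rest =>
    simp only [check_is_hamiltonian_circuit, check_is_hamiltonian_circuit_alt]
    have hVlast : (e0.1 :: (e0 :: rest).map (fun e => e.2)).getLastD "" = (rest.getLastD e0).2 := by
      rw [List.getLastD_cons, List.map_cons, List.getLastD_cons, pvGetLastD_map]
    by_cases hcl : e0.1 = (rest.getLastD e0).2
    swap
    · -- closure fails: A's guard and B's first conjunct
      rw [if_pos (by simpa using hcl)]
      have h1 : ((e0.1 :: (e0 :: rest).map (fun e => e.2)).headI ==
          (e0.1 :: (e0 :: rest).map (fun e => e.2)).getLastD "") = false := by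
        rw [hVlast]; simpa using hcl
      rw [h1]
      simp only [Bool.false_and]
    · rw [if_neg (by simpa using hcl)]
      simp only [pvALoop]
      by_cases hce : e0 ∈ graph.2
      swap
      · rw [if_pos (by simp [List.contains_eq_mem, hce, PySem.Set.empty])]
        have h2 : ((e0 :: rest).all (fun e => graph.2.contains e)) = false := by
          rw [List.all_eq_false]
          exact ⟨e0, List.mem_cons_self, by simp [List.contains_eq_mem, hce]⟩
        rw [h2]
        simp only [Bool.and_false, Bool.false_and]
      rw [if_neg (by simp [List.contains_eq_mem, hce, PySem.Set.empty])]
      rw [if_neg (by simp)]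
      have hadd1 : PySem.Set.add PySem.Set.empty e0.1 = [e0.1] := by
        simp [PySem.Set.empty]
      have hadd2 : PySem.Set.add PySem.Set.empty e0 = [e0] := by
        simp [PySem.Set.empty]
      rw [hadd1, hadd2]
      by_cases hrest : rest = []
      · subst hrest
        -- single-edge path; closure gives e0.1 = e0.2
        have hc : e0.1 = e0.2 := hcl
        rw [if_neg (by simp)]
        simp only [pvALoop]
        have haddv : PySem.Set.add [e0.1] e0.2 = [e0.1] := by
          rw [PySem.Set.add_of_mem (by simp [← hc])]
        rw [haddv]
        have hright : PySem.Set.ofList [e0.1, e0.2] = [e0.1] := by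
          rw [← hc]
          rw [PySem.Set.ofList_cons]
          simp [PySem.Set.ofList_cons, PySem.Set.ofList_nil, PySem.Set.discard]
        simp [List.contains_eq_mem, hce, ← hc, PySem.Set.ofList_cons,
          PySem.Set.discard]
      · have hgl : rest.getLast? = some (rest.getLastD e0) := by
          cases hx : rest.getLast? with
          | none => exact absurd (List.getLast?_eq_none_iff.mp hx) hrest
          | some w => rw [List.getLastD_eq_getLast?, hx]; rfl
        have hmapne : rest.map (fun e => e.2) ≠ [] := by simpa using hrest
        by_cases heq0 : e0 = rest.getLastD e0
        · -- the closing edge occurs twice in path: both sides reject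
          have hmem' : e0 ∈ rest := by
            obtain ⟨ys, hys⟩ := List.getLast?_eq_some_iff.mp hgl
            rw [heq0, hys]; simp
          have heq0' : rest.getLast?.getD e0 = e0 := by
            rw [← List.getLastD_eq_getLast?, ← heq0]
          rw [if_neg (by simp [heq0'])]
          rw [pvALoop_dead graph.2 _ graph.1 rest _ _ _ hgl (by rw [← heq0]; simp)]
          have h3 : ((PySem.Set.ofList (e0 :: rest)).length == (e0 :: rest).length) = false := by
            rw [beq_eq_false_iff_ne]
            intro hl
            exact (List.nodup_cons.mp ((pvLenOfList _).mp hl)).1 hmem'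
          rw [h3]
          simp only [Bool.and_false, Bool.false_and]
        · have hne0 : rest.getLastD e0 ≠ e0 := fun h => heq0 h.symm
          have hne0' : ¬ rest.getLast?.getD e0 = e0 := by
            rw [← List.getLastD_eq_getLast?]; exact hne0
          by_cases hee : e0.2 = e0.1
          · -- interior revisit of the start vertex on a multi-edge path
            rw [if_pos (by simp [List.contains_eq_mem, hee, hne0'])]
            have h5 : ((PySem.Set.ofList (e0.1 :: List.map (fun e => e.2) (e0 :: rest)).dropLast).length ==
                (e0.1 :: List.map (fun e => e.2) (e0 :: rest)).length - 1) = false := by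
              rw [show (e0.1 :: List.map (fun e => e.2) (e0 :: rest)).length - 1 =
                  (e0.1 :: List.map (fun e => e.2) (e0 :: rest)).dropLast.length from
                  List.length_dropLast.symm]
              rw [beq_eq_false_iff_ne]
              intro hl
              have hnd := (pvLenOfList _).mp hl
              rw [List.map_cons, List.dropLast_cons_of_ne_nil (List.cons_ne_nil _ _),
                List.dropLast_cons_of_ne_nil hmapne] at hnd
              exact (List.nodup_cons.mp hnd).1 (by simp [hee])
            rw [h5]
            simp only [Bool.and_false, Bool.false_and]
          · rw [if_neg (by simp [List.contains_eq_mem, hee])]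
            have haddv : PySem.Set.add [e0.1] e0.2 = [e0.1, e0.2] := by
              rw [PySem.Set.add_of_not_mem (by simp [hee])]
              rfl
            rw [haddv]
            rw [Bool.eq_iff_iff]
            rw [pvALoop_char graph.2 (rest.getLastD e0) graph.1 rest e0.2 [e0.1, e0.2] [e0]
              (fun _ => hgl) (by simpa using hne0)]
            simp only [Bool.and_eq_true]
            rw [pvChainIdx ("", "") (e0 :: rest) e0.1]
            have ic1 : ((e0.1 :: List.map (fun e => e.2) (e0 :: rest)).headI ==
                (e0.1 :: List.map (fun e => e.2) (e0 :: rest)).getLastD "") = true := by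
              rw [hVlast]
              simpa using hcl
            have ic2 : ((e0 :: rest).all (fun e => graph.2.contains e) = true) ↔
                (∀ e ∈ rest, e ∈ graph.2) := by
              rw [List.all_cons, Bool.and_eq_true, List.all_eq_true]
              constructor
              · intro h e he
                have := h.2 e he
                simpa [List.contains_eq_mem] using this
              · intro h
                exact ⟨by simp [List.contains_eq_mem, hce],
                  fun e he => by simp [List.contains_eq_mem, h e he]⟩
            have ic3 : (((PySem.Set.ofList (e0 :: rest)).length == (e0 :: rest).length) = true) ↔
                (e0 ∉ rest ∧ rest.Nodup) := by
              rw [beq_iff_eq, pvLenOfList, List.nodup_cons]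
            have ic5 : (((PySem.Set.ofList (e0.1 :: List.map (fun e => e.2) (e0 :: rest)).dropLast).length ==
                (e0.1 :: List.map (fun e => e.2) (e0 :: rest)).length - 1) = true) ↔
                (e0.1 ∉ (e0.2 :: (rest.map (fun e => e.2)).dropLast) ∧
                 e0.2 ∉ (rest.map (fun e => e.2)).dropLast ∧
                 (rest.map (fun e => e.2)).dropLast.Nodup) := by
              rw [show (e0.1 :: List.map (fun e => e.2) (e0 :: rest)).length - 1 =
                  (e0.1 :: List.map (fun e => e.2) (e0 :: rest)).dropLast.length from
                  List.length_dropLast.symm]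
              rw [beq_iff_eq, pvLenOfList]
              rw [List.map_cons, List.dropLast_cons_of_ne_nil (List.cons_ne_nil _ _),
                List.dropLast_cons_of_ne_nil hmapne]
              rw [List.nodup_cons, List.nodup_cons]
            have ic6 : (PySem.Set.equal (PySem.Set.ofList (e0.1 :: List.map (fun e => e.2) (e0 :: rest)))
                (PySem.Set.ofList graph.1) = true) ↔
                (PySem.Set.equal (List.foldl PySem.Set.add [e0.1, e0.2] (rest.map (fun e => e.2)))
                  (PySem.Set.ofList graph.1) = true) := by
              rw [PySem.Set.equal_iff, PySem.Set.equal_iff]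
              have hm : ∀ x, (x ∈ PySem.Set.ofList (e0.1 :: List.map (fun e => e.2) (e0 :: rest)) ↔
                  x ∈ List.foldl PySem.Set.add [e0.1, e0.2] (rest.map (fun e => e.2))) := by
                intro x
                rw [PySem.Set.mem_ofList, pvMemFoldlAdd]
                simp only [List.map_cons, List.mem_cons]
                tauto
              exact ⟨fun h x => ((hm x).symm).trans (h x), fun h x => (hm x).trans (h x)⟩
            rw [ic2, ic3, ic6]
            rw [ic5]
            simp only [ic1, true_and]
            simp only [pvGood, pvChain]
            have hee' : e0.1 ≠ e0.2 := fun h => hee h.symm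
            have hee' : e0.1 ≠ e0.2 := fun h => hee h.symm
            constructor
            · rintro ⟨g1, g2, g3, g4, g5, g6, g7⟩
              refine ⟨⟨⟨⟨g1, fun hmem => (g2 e0 hmem) (by simp), g3⟩, trivial, g4⟩,
                ?_, ?_, g5⟩, g7⟩
              · simp only [List.mem_cons, not_or]
                exact ⟨hee', fun hmem => ((g6 e0.1 hmem) (by simp))⟩
              · intro hmem
                exact (g6 e0.2 hmem) (by simp)
            · rintro ⟨⟨⟨⟨b2, b3a, b3b⟩, -, b4⟩, b5a, b5b, b5c⟩, b6⟩
              simp only [List.mem_cons, not_or] at b5a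
              refine ⟨b2, ?_, b3b, b4, b5c, ?_, b6⟩
              · intro e he
                simp only [List.mem_cons, List.not_mem_nil, or_false]
                exact fun h => b3a (h ▸ he)
              · intro x hx
                simp only [List.mem_cons, List.not_mem_nil, or_false, not_or]
                exact ⟨fun h => b5a.2 (h ▸ hx), fun h => b5b (h ▸ hx)⟩

-- ===== VERDICT (by name: the statement is the Claim_ definition above) =====
theorem check_is_hamiltonian_circuit_spec : Claim_equal_check_is_hamiltonian_circuit := by
  intro graph path _
  unfold Spec_check_is_hamiltonian_circuit
  exact pvMain graph path
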